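-- pv_equiv track=rewrite | github.com/DiegoCC14/Agentes_Comunicados_Buscando_Obejtivos | Agentes.py | obteniendo_list_camino_a_objetivo
-- ===== SOURCE A (Python) =====
-- def obteniendo_list_camino_a_objetivo( tupla_pos_inicial , tupla_pos_objetivo ):
-- 	#Definimos el camino hacia el objetivo, el mas corto
-- 	# -El camino siempre es el mas corto, en diagonal
--
-- 	#LAS TUPLAS SON INMUTABLES, NO ES POSIBLE MODIFICARLOS
--
-- 	tupla_pasos_faltantes = ( tupla_pos_objetivo[0]-tupla_pos_inicial[0] , tupla_pos_objetivo[1]-tupla_pos_inicial[1] )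
--
-- 	list_tupla_camino = []
--
-- 	while tupla_pasos_faltantes[0] != 0 and tupla_pasos_faltantes[1] != 0 :
-- 		mov_x = 1
-- 		if tupla_pasos_faltantes[0] < 0:
-- 			mov_x = -1
--
-- 		mov_y = 1
-- 		if tupla_pasos_faltantes[1] < 0:
-- 			mov_y = -1
--
-- 		list_tupla_camino.append( (mov_x,mov_y) )
--
-- 		tupla_pasos_faltantes = ( tupla_pasos_faltantes[0] + (-1)*mov_x , tupla_pasos_faltantes[1] + (-1)*mov_y )
--
-- 	while tupla_pasos_faltantes[0] != 0:
-- 		mov_x = 1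
-- 		if tupla_pasos_faltantes[0] < 0:
-- 			mov_x = -1
--
-- 		list_tupla_camino.append( (mov_x,0) )
--
-- 		tupla_pasos_faltantes = ( tupla_pasos_faltantes[0] + (-1)*mov_x , 0 )
--
-- 	while tupla_pasos_faltantes[1] != 0:
-- 		mov_y = 1
-- 		if tupla_pasos_faltantes[1] < 0:
-- 			mov_y = -1
--
-- 		list_tupla_camino.append( (0,mov_y) )
--
-- 		tupla_pasos_faltantes = ( 0 , tupla_pasos_faltantes[1] + (-1)*mov_y )
--
-- 	pos_actual = tupla_pos_inicial
-- 	lista_tupla_camino = [ tupla_pos_inicial ]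
-- 	for tupla_paso in list_tupla_camino:
-- 		pos_actual = ( pos_actual[0] + tupla_paso[0] , pos_actual[1] + tupla_paso[1] )
-- 		lista_tupla_camino.append( pos_actual )
--
-- 	return lista_tupla_camino
-- ===== SOURCE B (Python) =====
-- def obteniendo_list_camino_a_objetivo(tupla_pos_inicial, tupla_pos_objetivo):
--     # One pass: step toward the goal by the sign of each remaining delta,
--     # emitting positions directly (no delta list, no reconstruction pass).
--     camino = [tupla_pos_inicial]
--     cur = tupla_pos_inicial
--     while cur != tupla_pos_objetivo:
--         sx = (tupla_pos_objetivo[0] > cur[0]) - (tupla_pos_objetivo[0] < cur[0])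
--         sy = (tupla_pos_objetivo[1] > cur[1]) - (tupla_pos_objetivo[1] < cur[1])
--         cur = (cur[0] + sx, cur[1] + sy)
--         camino.append(cur)
--     return camino
-- ===== Notes on version B (the rewrite author's own statement) =====
-- stated objective: simpler
-- what changed: Replaces A's three delta-building while-loops plus a reconstruction pass with a single loop that emits positions directly, stepping by the sign of each remaining coordinate difference.
import Mathlib
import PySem

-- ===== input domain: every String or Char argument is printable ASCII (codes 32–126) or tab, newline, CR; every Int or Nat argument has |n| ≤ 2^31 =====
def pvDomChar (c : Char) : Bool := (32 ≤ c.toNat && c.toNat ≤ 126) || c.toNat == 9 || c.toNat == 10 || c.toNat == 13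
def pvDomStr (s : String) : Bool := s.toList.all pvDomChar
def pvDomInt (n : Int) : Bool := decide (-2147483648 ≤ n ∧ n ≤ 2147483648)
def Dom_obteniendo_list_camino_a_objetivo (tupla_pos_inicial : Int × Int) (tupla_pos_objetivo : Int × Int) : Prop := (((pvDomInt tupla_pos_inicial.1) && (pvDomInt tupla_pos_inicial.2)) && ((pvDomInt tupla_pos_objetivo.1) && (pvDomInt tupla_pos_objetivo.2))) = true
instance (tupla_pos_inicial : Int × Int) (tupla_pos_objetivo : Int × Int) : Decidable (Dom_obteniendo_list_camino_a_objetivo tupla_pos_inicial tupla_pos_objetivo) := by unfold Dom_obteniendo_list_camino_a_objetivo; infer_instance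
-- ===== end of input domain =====

-- B replaces A's three delta-building loops + reconstruction pass with one loop emitting positions directly (objective: simpler).
-- Each while loop is ported as structural recursion on a fuel argument that only makes the loop total: the fuel the ports pass
-- in (the relevant absolute difference) is never exhausted before the loop's own guard stops it.

-- ===== PORT A =====
-- first while loop: both remaining deltas nonzero, append a diagonal move
def pvA_loop1 : Nat → (Int × Int) → List (Int × Int) → (Int × Int) × List (Int × Int)
  | 0, d, acc => (d, acc)
  | fuel + 1, d, acc =>
    if d.1 ≠ 0 ∧ d.2 ≠ 0 then
      let mov_x : Int := if d.1 < 0 then -1 else 1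
      let mov_y : Int := if d.2 < 0 then -1 else 1
      pvA_loop1 fuel (d.1 + (-1) * mov_x, d.2 + (-1) * mov_y) (acc ++ [(mov_x, mov_y)])
    else (d, acc)

-- second while loop: horizontal moves
def pvA_loop2 : Nat → (Int × Int) → List (Int × Int) → (Int × Int) × List (Int × Int)
  | 0, d, acc => (d, acc)
  | fuel + 1, d, acc =>
    if d.1 ≠ 0 then
      let mov_x : Int := if d.1 < 0 then -1 else 1
      pvA_loop2 fuel (d.1 + (-1) * mov_x, 0) (acc ++ [(mov_x, 0)])
    else (d, acc)

-- third while loop: vertical moves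
def pvA_loop3 : Nat → (Int × Int) → List (Int × Int) → (Int × Int) × List (Int × Int)
  | 0, d, acc => (d, acc)
  | fuel + 1, d, acc =>
    if d.2 ≠ 0 then
      let mov_y : Int := if d.2 < 0 then -1 else 1
      pvA_loop3 fuel (0, d.2 + (-1) * mov_y) (acc ++ [(0, mov_y)])
    else (d, acc)

def obteniendo_list_camino_a_objetivo (tupla_pos_inicial : Int × Int) (tupla_pos_objetivo : Int × Int) : List (Int × Int) :=
  let tupla_pasos_faltantes : Int × Int :=
    (tupla_pos_objetivo.1 - tupla_pos_inicial.1, tupla_pos_objetivo.2 - tupla_pos_inicial.2)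
  let r1 := pvA_loop1 tupla_pasos_faltantes.1.natAbs tupla_pasos_faltantes []
  let r2 := pvA_loop2 r1.1.1.natAbs r1.1 r1.2
  let r3 := pvA_loop3 r2.1.2.natAbs r2.1 r2.2
  -- final for-loop: rebuild positions from the delta list
  (r3.2.foldl
    (fun (st : (Int × Int) × List (Int × Int)) tupla_paso =>
      let p := (st.1.1 + tupla_paso.1, st.1.2 + tupla_paso.2)
      (p, st.2 ++ [p]))
    (tupla_pos_inicial, [tupla_pos_inicial])).2

-- ===== PORT B =====
def pvB_loop (obj : Int × Int) : Nat → (Int × Int) → List (Int × Int) → List (Int × Int)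
  | 0, _, camino => camino
  | fuel + 1, cur, camino =>
    if cur ≠ obj then
      let sx : Int := (if obj.1 > cur.1 then 1 else 0) - (if obj.1 < cur.1 then 1 else 0)
      let sy : Int := (if obj.2 > cur.2 then 1 else 0) - (if obj.2 < cur.2 then 1 else 0)
      let c2 : Int × Int := (cur.1 + sx, cur.2 + sy)
      pvB_loop obj fuel c2 (camino ++ [c2])
    else camino

def obteniendo_list_camino_a_objetivo_alt (tupla_pos_inicial : Int × Int) (tupla_pos_objetivo : Int × Int) : List (Int × Int) :=
  pvB_loop tupla_pos_objetivo
    ((tupla_pos_objetivo.1 - tupla_pos_inicial.1).natAbs + (tupla_pos_objetivo.2 - tupla_pos_inicial.2).natAbs)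
    tupla_pos_inicial [tupla_pos_inicial]

-- ===== PRECONDITION & SPEC =====
def Spec_obteniendo_list_camino_a_objetivo (tupla_pos_inicial : Int × Int) (tupla_pos_objetivo : Int × Int) (out : List (Int × Int)) : Prop := out = obteniendo_list_camino_a_objetivo_alt tupla_pos_inicial tupla_pos_objetivo
instance (tupla_pos_inicial : Int × Int) (tupla_pos_objetivo : Int × Int) (out : List (Int × Int)) : Decidable (Spec_obteniendo_list_camino_a_objetivo tupla_pos_inicial tupla_pos_objetivo out) := by unfold Spec_obteniendo_list_camino_a_objetivo; infer_instance

-- ===== CLAIM (what is proved, stated in full; the proofs are below) =====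
def Claim_equal_obteniendo_list_camino_a_objetivo : Prop := ∀ (tupla_pos_inicial : Int × Int) (tupla_pos_objetivo : Int × Int), Dom_obteniendo_list_camino_a_objetivo tupla_pos_inicial tupla_pos_objetivo → Spec_obteniendo_list_camino_a_objetivo tupla_pos_inicial tupla_pos_objetivo (obteniendo_list_camino_a_objetivo tupla_pos_inicial tupla_pos_objetivo)

-- ===== LEMMAS AND PROOFS =====

-- the unit step both programs take on a nonzero remaining delta
def pvSgn (x : Int) : Int := if x < 0 then -1 else 1

-- tail of the rebuilt path: positions obtained by walking a delta list from cur
def pvWalk (cur : Int × Int) : List (Int × Int) → List (Int × Int)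
  | [] => []
  | m :: ds => (cur.1 + m.1, cur.2 + m.2) :: pvWalk (cur.1 + m.1, cur.2 + m.2) ds

-- the delta list A builds for a remaining difference d (exactly the port's loop chain)
def pvADeltas (d : Int × Int) : List (Int × Int) :=
  let r1 := pvA_loop1 d.1.natAbs d []
  let r2 := pvA_loop2 r1.1.1.natAbs r1.1 r1.2
  (pvA_loop3 r2.1.2.natAbs r2.1 r2.2).2

lemma pvA_loop1_acc (f : Nat) (d : Int × Int) (acc : List (Int × Int)) :
    pvA_loop1 f d acc = ((pvA_loop1 f d []).1, acc ++ (pvA_loop1 f d []).2) := by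
  induction f generalizing d acc with
  | zero => simp [pvA_loop1]
  | succ f ih =>
    by_cases h : d.1 ≠ 0 ∧ d.2 ≠ 0
    · simp only [pvA_loop1, if_pos h]
      rw [ih, ih _ ([] ++ [_])]
      simp
    · simp [pvA_loop1, if_neg h]

lemma pvA_loop2_acc (f : Nat) (d : Int × Int) (acc : List (Int × Int)) :
    pvA_loop2 f d acc = ((pvA_loop2 f d []).1, acc ++ (pvA_loop2 f d []).2) := by
  induction f generalizing d acc with
  | zero => simp [pvA_loop2]
  | succ f ih =>
    by_cases h : d.1 ≠ 0
    · simp only [pvA_loop2, if_pos h]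
      rw [ih, ih _ ([] ++ [_])]
      simp
    · simp [pvA_loop2, if_neg h]

lemma pvA_loop3_acc (f : Nat) (d : Int × Int) (acc : List (Int × Int)) :
    pvA_loop3 f d acc = ((pvA_loop3 f d []).1, acc ++ (pvA_loop3 f d []).2) := by
  induction f generalizing d acc with
  | zero => simp [pvA_loop3]
  | succ f ih =>
    by_cases h : d.2 ≠ 0
    · simp only [pvA_loop3, if_pos h]
      rw [ih, ih _ ([] ++ [_])]
      simp
    · simp [pvA_loop3, if_neg h]

lemma pvB_loop_acc (obj : Int × Int) (f : Nat) (cur : Int × Int) (acc : List (Int × Int)) :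
    pvB_loop obj f cur acc = acc ++ pvB_loop obj f cur [] := by
  induction f generalizing cur acc with
  | zero => simp [pvB_loop]
  | succ f ih =>
    by_cases h : cur ≠ obj
    · simp only [pvB_loop, if_pos h]
      rw [ih, ih _ ([] ++ [_])]
      simp
    · simp [pvB_loop, if_neg h]

-- A's rebuild fold appends exactly the walk of the delta list
lemma pvRebuild_eq (ds : List (Int × Int)) (pos : Int × Int) (lista : List (Int × Int)) :
    (ds.foldl
      (fun (st : (Int × Int) × List (Int × Int)) tupla_paso =>
        let p := (st.1.1 + tupla_paso.1, st.1.2 + tupla_paso.2)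
        (p, st.2 ++ [p]))
      (pos, lista)).2 = lista ++ pvWalk pos ds := by
  induction ds generalizing pos lista with
  | nil => simp [pvWalk]
  | cons m ds ih => simp [pvWalk, ih, List.append_assoc]

-- loops with a false guard return immediately, whatever fuel remains
lemma pvA_loop1_done (f : Nat) (d : Int × Int) (acc : List (Int × Int)) (h : ¬(d.1 ≠ 0 ∧ d.2 ≠ 0)) :
    pvA_loop1 f d acc = (d, acc) := by cases f <;> simp [pvA_loop1, if_neg h]

lemma pvA_loop2_done (f : Nat) (d : Int × Int) (acc : List (Int × Int)) (h : d.1 = 0) :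
    pvA_loop2 f d acc = (d, acc) := by cases f <;> simp [pvA_loop2, h]

lemma pvA_loop3_done (f : Nat) (d : Int × Int) (acc : List (Int × Int)) (h : d.2 = 0) :
    pvA_loop3 f d acc = (d, acc) := by cases f <;> simp [pvA_loop3, h]

-- one unfolding of each loop with a true guard, in pvSgn form
lemma pvA_loop1_succ (f : Nat) (d : Int × Int) (acc : List (Int × Int)) (h : d.1 ≠ 0 ∧ d.2 ≠ 0) :
    pvA_loop1 (f + 1) d acc
      = pvA_loop1 f (d.1 + (-1) * pvSgn d.1, d.2 + (-1) * pvSgn d.2) (acc ++ [(pvSgn d.1, pvSgn d.2)]) := by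
  simp only [pvA_loop1, if_pos h, pvSgn]

lemma pvA_loop2_succ (f : Nat) (d : Int × Int) (acc : List (Int × Int)) (h : d.1 ≠ 0) :
    pvA_loop2 (f + 1) d acc = pvA_loop2 f (d.1 + (-1) * pvSgn d.1, 0) (acc ++ [(pvSgn d.1, 0)]) := by
  simp only [pvA_loop2, if_pos h, pvSgn]

lemma pvA_loop3_succ (f : Nat) (d : Int × Int) (acc : List (Int × Int)) (h : d.2 ≠ 0) :
    pvA_loop3 (f + 1) d acc = pvA_loop3 f (0, d.2 + (-1) * pvSgn d.2) (acc ++ [(0, pvSgn d.2)]) := by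
  simp only [pvA_loop3, if_pos h, pvSgn]

-- |x| drops by exactly one under a unit step toward zero
lemma pvSgn_natAbs (x : Int) (h : x ≠ 0) : x.natAbs = (x + (-1) * pvSgn x).natAbs + 1 := by
  unfold pvSgn; split_ifs <;> omega

-- one step of A's delta list, per phase
lemma pvADeltas_diag (d : Int × Int) (hx : d.1 ≠ 0) (hy : d.2 ≠ 0) :
    pvADeltas d = (pvSgn d.1, pvSgn d.2) :: pvADeltas (d.1 + (-1) * pvSgn d.1, d.2 + (-1) * pvSgn d.2) := by
  simp only [pvADeltas]
  rw [pvSgn_natAbs d.1 hx, pvA_loop1_succ _ _ _ ⟨hx, hy⟩, pvA_loop1_acc]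
  rw [pvA_loop2_acc, pvA_loop3_acc]
  conv_rhs => rw [pvA_loop2_acc, pvA_loop3_acc]
  simp

lemma pvADeltas_horiz (d : Int × Int) (hx : d.1 ≠ 0) (hy : d.2 = 0) :
    pvADeltas d = (pvSgn d.1, 0) :: pvADeltas (d.1 + (-1) * pvSgn d.1, 0) := by
  simp only [pvADeltas]
  rw [pvA_loop1_done _ _ _ (by simp [hy]), pvA_loop1_done _ _ _ (by simp)]
  rw [pvSgn_natAbs d.1 hx, pvA_loop2_succ _ _ _ hx, pvA_loop2_acc]
  rw [pvA_loop3_acc]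
  conv_rhs => rw [pvA_loop3_acc]
  simp

lemma pvADeltas_vert (d : Int × Int) (hx : d.1 = 0) (hy : d.2 ≠ 0) :
    pvADeltas d = (0, pvSgn d.2) :: pvADeltas (0, d.2 + (-1) * pvSgn d.2) := by
  simp only [pvADeltas]
  rw [pvA_loop1_done _ _ _ (by simp [hx]), pvA_loop1_done _ _ _ (by simp)]
  rw [pvA_loop2_done _ _ _ hx, pvA_loop2_done _ _ _ (by simp)]
  rw [pvSgn_natAbs d.2 hy, pvA_loop3_succ _ _ _ hy, pvA_loop3_acc]
  simp

lemma pvADeltas_done (d : Int × Int) (hx : d.1 = 0) (hy : d.2 = 0) : pvADeltas d = [] := by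
  simp only [pvADeltas]
  rw [pvA_loop1_done _ _ _ (by simp [hx]), pvA_loop2_done _ _ _ hx, pvA_loop3_done _ _ _ hy]

-- main invariant: walking A's delta list from cur equals B's loop tail from cur, for any sufficient fuel
lemma pvMain (obj : Int × Int) : ∀ (f : Nat) (cur : Int × Int),
    (obj.1 - cur.1).natAbs + (obj.2 - cur.2).natAbs ≤ f →
    pvWalk cur (pvADeltas (obj.1 - cur.1, obj.2 - cur.2)) = pvB_loop obj f cur [] := by
  intro f
  induction f with
  | zero =>
    intro cur hf
    have hx : obj.1 - cur.1 = 0 := by omega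
    have hy : obj.2 - cur.2 = 0 := by omega
    rw [pvADeltas_done _ (by simpa using hx) (by simpa using hy)]
    simp [pvWalk, pvB_loop]
  | succ f ih =>
    intro cur hf
    by_cases h : cur = obj
    · subst h
      rw [pvADeltas_done _ (by simp) (by simp)]
      simp [pvWalk, pvB_loop]
    · simp only [pvB_loop, if_pos (show cur ≠ obj from h)]
      rw [pvB_loop_acc]
      have hne : ¬(cur.1 = obj.1 ∧ cur.2 = obj.2) := by simpa [Prod.ext_iff] using h
      have hsgn1 : obj.1 - cur.1 ≠ 0 →
          ((if obj.1 > cur.1 then (1 : Int) else 0) - (if obj.1 < cur.1 then 1 else 0))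
            = pvSgn (obj.1 - cur.1) := by
        intro hx; unfold pvSgn; split_ifs <;> omega
      have hsgn2 : obj.2 - cur.2 ≠ 0 →
          ((if obj.2 > cur.2 then (1 : Int) else 0) - (if obj.2 < cur.2 then 1 else 0))
            = pvSgn (obj.2 - cur.2) := by
        intro hy; unfold pvSgn; split_ifs <;> omega
      have hz1 : obj.1 - cur.1 = 0 →
          ((if obj.1 > cur.1 then (1 : Int) else 0) - (if obj.1 < cur.1 then 1 else 0)) = 0 := by
        intro hx; split_ifs <;> omega
      have hz2 : obj.2 - cur.2 = 0 →
          ((if obj.2 > cur.2 then (1 : Int) else 0) - (if obj.2 < cur.2 then 1 else 0)) = 0 := by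
        intro hy; split_ifs <;> omega
      have hsabs : ∀ x : Int, x ≠ 0 → (x + (-1) * pvSgn x).natAbs < x.natAbs := by
        intro x hx; unfold pvSgn; split_ifs <;> omega
      by_cases hx : obj.1 - cur.1 ≠ 0 <;> by_cases hy : obj.2 - cur.2 ≠ 0
      · rw [pvADeltas_diag _ hx hy]
        simp only [pvWalk]
        rw [hsgn1 hx, hsgn2 hy]
        have harg1 : obj.1 - cur.1 + (-1) * pvSgn (obj.1 - cur.1)
            = obj.1 - (cur.1 + pvSgn (obj.1 - cur.1)) := by ring
        have harg2 : obj.2 - cur.2 + (-1) * pvSgn (obj.2 - cur.2)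
            = obj.2 - (cur.2 + pvSgn (obj.2 - cur.2)) := by ring
        have hlt : (obj.1 - (cur.1 + pvSgn (obj.1 - cur.1))).natAbs
            + (obj.2 - (cur.2 + pvSgn (obj.2 - cur.2))).natAbs ≤ f := by
          have h1 := hsabs _ hx; have h2 := hsabs _ hy
          omega
        have := ih (cur.1 + pvSgn (obj.1 - cur.1), cur.2 + pvSgn (obj.2 - cur.2)) hlt
        simp only at this
        rw [harg1, harg2, this]
        simp
      · have hy0 : obj.2 - cur.2 = 0 := by omega
        rw [pvADeltas_horiz _ hx hy0]
        simp only [pvWalk]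
        rw [hsgn1 hx, hz2 hy0]
        have harg1 : obj.1 - cur.1 + (-1) * pvSgn (obj.1 - cur.1)
            = obj.1 - (cur.1 + pvSgn (obj.1 - cur.1)) := by ring
        have harg2 : (0 : Int) = obj.2 - (cur.2 + 0) := by omega
        have hlt : (obj.1 - (cur.1 + pvSgn (obj.1 - cur.1))).natAbs
            + (obj.2 - (cur.2 + 0)).natAbs ≤ f := by
          have h1 := hsabs _ hx; omega
        have := ih (cur.1 + pvSgn (obj.1 - cur.1), cur.2 + 0) hlt
        simp only at this
        rw [← harg2] at this
        rw [harg1, this]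
        simp
      · have hx0 : obj.1 - cur.1 = 0 := by omega
        rw [pvADeltas_vert _ hx0 hy]
        simp only [pvWalk]
        rw [hz1 hx0, hsgn2 hy]
        have harg1 : (0 : Int) = obj.1 - (cur.1 + 0) := by omega
        have harg2 : obj.2 - cur.2 + (-1) * pvSgn (obj.2 - cur.2)
            = obj.2 - (cur.2 + pvSgn (obj.2 - cur.2)) := by ring
        have hlt : (obj.1 - (cur.1 + 0)).natAbs
            + (obj.2 - (cur.2 + pvSgn (obj.2 - cur.2))).natAbs ≤ f := by
          have h2 := hsabs _ hy; omega
        have := ih (cur.1 + 0, cur.2 + pvSgn (obj.2 - cur.2)) hlt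
        simp only at this
        rw [← harg1] at this
        rw [harg2, this]
        simp
      · exact absurd (Prod.ext_iff.mpr ⟨by omega, by omega⟩) h

-- ===== VERDICT (by name: the statement is the Claim_ definition above) =====
theorem obteniendo_list_camino_a_objetivo_spec : Claim_equal_obteniendo_list_camino_a_objetivo := by
  intro ini obj _
  unfold Spec_obteniendo_list_camino_a_objetivo
  unfold obteniendo_list_camino_a_objetivo obteniendo_list_camino_a_objetivo_alt
  rw [pvRebuild_eq, pvB_loop_acc]
  simp only [List.singleton_append, List.cons.injEq, true_and]
  exact pvMain obj _ ini le_rfl
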